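-- pv_equiv track=rewrite | github.com/saezlab/pypath | pypath/inputs_v2/parsers/reactome.py | _build_pathway_terms
-- ===== SOURCE A (Python) =====
-- from collections import defaultdict
--
-- _LIST_DELIMITER = "||"
--
-- _MISSING_VALUE = "__MISSING__"
--
-- def _split_field(value: str, delimiter: str = _LIST_DELIMITER) -> list[str]:
--     if not value:
--         return []
--     return [item for item in value.split(delimiter) if item and item != _MISSING_VALUE]
--
-- def _build_pathway_terms(pathway_records: list[dict]) -> list[dict]:
--     terms: dict[str, dict] = {}
--     parent_map: defaultdict[str, list[tuple[str, str]]] = defaultdict(list)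
--
--     for record in pathway_records:
--         stable_id = record.get('reactome_stable_id', '').split(';')[0]
--         if not stable_id:
--             continue
--
--         term = terms.setdefault(
--             stable_id,
--             {
--                 'id': stable_id,
--                 'name': record.get('display_name', ''),
--                 'definition': record.get('definition', ''),
--                 'synonyms': [],
--                 'comments': [],
--                 'xrefs': [],
--                 'parent_ids': [],
--                 'parent_names': [],
--             },
--         )
--         term['synonyms'].extend([s for s in record.get('synonyms', '').split(';') if s])
--         term['comments'].extend([c for c in record.get('comments', '').split(';') if c])
--
--         reactome_id = record.get('reactome_id', '')
--         if reactome_id: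
--             term['xrefs'].append(f'Reactome:{reactome_id}')
--         term['xrefs'].extend([g for g in record.get('go', '').split(';') if g])
--         taxon_id = record.get('ncbi_tax_id', '')
--         if taxon_id:
--             term['xrefs'].append(f'NCBITaxon:{taxon_id}')
--
--         child_ids = _split_field(record.get('child_pathway_reactome_stable_id', ''))
--         child_names = _split_field(record.get('child_pathway_display_name', ''))
--         for idx, child_id_field in enumerate(child_ids):
--             child_id = child_id_field.split(';')[0]
--             if not child_id:
--                 continue
--             child_name = child_names[idx] if idx < len(child_names) else ''
--             parent_map[child_id].append((stable_id, record.get('display_name', '')))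
--             terms.setdefault(
--                 child_id,
--                 {
--                     'id': child_id,
--                     'name': child_name,
--                     'definition': '',
--                     'synonyms': [],
--                     'comments': [],
--                     'xrefs': [],
--                     'parent_ids': [],
--                     'parent_names': [],
--                 },
--             )
--
--     for term_id, parents in parent_map.items():
--         seen: set[tuple[str, str]] = set()
--         for parent_id, parent_name in parents:
--             key = (parent_id, parent_name)
--             if key in seen:
--                 continue
--             seen.add(key)
--             terms[term_id]['parent_ids'].append(parent_id)
--             terms[term_id]['parent_names'].append(parent_name)
--
--     for term in terms.values():
--         term['synonyms'] = sorted(set(term['synonyms']))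
--         term['comments'] = list(dict.fromkeys(term['comments']))
--         term['xrefs'] = list(dict.fromkeys(term['xrefs']))
--         term['synonyms'] = ';'.join(term['synonyms'])
--         term['comments'] = ';'.join(term['comments'])
--         term['xrefs'] = ';'.join(term['xrefs'])
--         term['parent_ids'] = ';'.join(term['parent_ids'])
--         term['parent_names'] = ';'.join(term['parent_names'])
--
--     return sorted(terms.values(), key=lambda t: t['id'])
-- ===== SOURCE B (Python) =====
-- # B: single-pass variant — no parent_map and no second dedup pass; parent ids/names are
-- # appended directly onto the child term during the record loop, deduplicated by checking
-- # the child's already-recorded (parent_id, parent_name) pairs.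
-- _LIST_DELIMITER = "||"
-- _MISSING_VALUE = "__MISSING__"
--
--
-- def _split_field(value, delimiter=_LIST_DELIMITER):
--     if not value:
--         return []
--     return [item for item in value.split(delimiter) if item and item != _MISSING_VALUE]
--
--
-- def _new_term(term_id, name, definition):
--     return {
--         'id': term_id,
--         'name': name,
--         'definition': definition,
--         'synonyms': [],
--         'comments': [],
--         'xrefs': [],
--         'parent_ids': [],
--         'parent_names': [],
--     }
--
--
-- def _build_pathway_terms(pathway_records):
--     terms = {}
--
--     for record in pathway_records:
--         stable_id = record.get('reactome_stable_id', '').split(';')[0]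
--         if not stable_id:
--             continue
--
--         name = record.get('display_name', '')
--         term = terms.setdefault(
--             stable_id, _new_term(stable_id, name, record.get('definition', ''))
--         )
--         term['synonyms'].extend(s for s in record.get('synonyms', '').split(';') if s)
--         term['comments'].extend(c for c in record.get('comments', '').split(';') if c)
--
--         reactome_id = record.get('reactome_id', '')
--         if reactome_id:
--             term['xrefs'].append(f'Reactome:{reactome_id}')
--         term['xrefs'].extend(g for g in record.get('go', '').split(';') if g)
--         taxon_id = record.get('ncbi_tax_id', '')
--         if taxon_id:
--             term['xrefs'].append(f'NCBITaxon:{taxon_id}')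
--
--         child_ids = _split_field(record.get('child_pathway_reactome_stable_id', ''))
--         child_names = _split_field(record.get('child_pathway_display_name', ''))
--         for idx, child_id_field in enumerate(child_ids):
--             child_id = child_id_field.split(';')[0]
--             if not child_id:
--                 continue
--             child_name = child_names[idx] if idx < len(child_names) else ''
--             child = terms.setdefault(child_id, _new_term(child_id, child_name, ''))
--             if (stable_id, name) not in zip(child['parent_ids'], child['parent_names']):
--                 child['parent_ids'].append(stable_id)
--                 child['parent_names'].append(name)
--
--     for term in terms.values():
--         term['synonyms'] = ';'.join(sorted(set(term['synonyms'])))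
--         term['comments'] = ';'.join(dict.fromkeys(term['comments']))
--         term['xrefs'] = ';'.join(dict.fromkeys(term['xrefs']))
--         term['parent_ids'] = ';'.join(term['parent_ids'])
--         term['parent_names'] = ';'.join(term['parent_names'])
--
--     return sorted(terms.values(), key=lambda t: t['id'])
-- ===== Notes on version B (the rewrite author's own statement) =====
-- stated objective: simpler
-- what changed: B drops A's separate parent_map defaultdict and its whole second dedup pass: parent ids/names are appended directly onto the child term inside the record loop, deduplicated by checking the child's already-recorded (parent_id, parent_name) pairs.
import Mathlib
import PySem

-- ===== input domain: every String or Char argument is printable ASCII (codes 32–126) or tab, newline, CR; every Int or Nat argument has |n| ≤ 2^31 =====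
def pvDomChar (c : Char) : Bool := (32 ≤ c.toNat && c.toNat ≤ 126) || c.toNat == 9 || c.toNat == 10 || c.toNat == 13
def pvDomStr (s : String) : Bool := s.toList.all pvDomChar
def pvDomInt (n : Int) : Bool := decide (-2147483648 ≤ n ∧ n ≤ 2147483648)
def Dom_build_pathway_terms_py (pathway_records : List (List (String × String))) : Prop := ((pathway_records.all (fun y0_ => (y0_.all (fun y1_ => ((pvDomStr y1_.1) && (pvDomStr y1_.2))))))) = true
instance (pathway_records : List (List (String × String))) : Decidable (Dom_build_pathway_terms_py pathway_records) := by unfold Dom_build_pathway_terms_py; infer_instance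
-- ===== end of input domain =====

-- B replaces A's separate parent_map + second dedup pass by appending parents onto the
-- child term inside the record loop (dedup against the child's already-recorded pairs).

-- ===== shared helpers (these Python lines are verbatim identical in A and B) =====

-- a term dict: fixed key set, creation order id,name,definition,synonyms,comments,xrefs,parent_ids,parent_names
structure PvTerm where
  id : String
  name : String
  defn : String
  synonyms : List String
  comments : List String
  xrefs : List String
  parentIds : List String
  parentNames : List String
deriving Repr, DecidableEq

-- record.get(k, ''): first-match lookup in the association list
def pvRGet (record : List (String × String)) (k : String) : String :=
  (PySem.Dict.mk record).getD k ""

-- s.split(';')[0]  (split? with ';' ≠ '' is always `some` and non-empty, so [0] never raises)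
def pvFirstField (s : String) : String :=
  (((PySem.Str.split? s ";").getD []).headD "")

-- [x for x in s.split(';') if x]
def pvSemiItems (s : String) : List String :=
  ((PySem.Str.split? s ";").getD []).filter (fun x => x != "")

-- _split_field
def pvSplitField (value : String) : List String :=
  if value = "" then []
  else ((PySem.Str.split? value "||").getD []).filter
    (fun item => item != "" && item != "__MISSING__")

-- the term-template dict literal
def pvMkTerm (i n d : String) : PvTerm := ⟨i, n, d, [], [], [], [], []⟩

-- the synonyms/comments/xrefs lines of the record loop (identical in A and B)
def pvIngest (record : List (String × String)) (term : PvTerm) : PvTerm :=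
  let term := { term with
    synonyms := term.synonyms ++ pvSemiItems (pvRGet record "synonyms"),
    comments := term.comments ++ pvSemiItems (pvRGet record "comments") }
  let reactome_id := pvRGet record "reactome_id"
  let term := if reactome_id != "" then
      { term with xrefs := term.xrefs ++ ["Reactome:" ++ reactome_id] } else term
  let term := { term with xrefs := term.xrefs ++ pvSemiItems (pvRGet record "go") }
  let taxon_id := pvRGet record "ncbi_tax_id"
  if taxon_id != "" then
      { term with xrefs := term.xrefs ++ ["NCBITaxon:" ++ taxon_id] } else term

-- the final formatting loop over a term (identical in A and B)
def pvRender (t : PvTerm) : List (String × String) :=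
  [("id", t.id), ("name", t.name), ("definition", t.defn),
   ("synonyms", PySem.Str.join ";" (PySem.List.sorted (PySem.Set.ofList t.synonyms) (fun s => s) false)),
   ("comments", PySem.Str.join ";" (PySem.List.dedup t.comments)),
   ("xrefs", PySem.Str.join ";" (PySem.List.dedup t.xrefs)),
   ("parent_ids", PySem.Str.join ";" t.parentIds),
   ("parent_names", PySem.Str.join ";" t.parentNames)]

-- format every term, then sorted(terms.values(), key=lambda t: t['id'])
def pvFinalize (terms : PySem.Dict String PvTerm) : List (List (String × String)) :=
  PySem.List.sorted (terms.values.map pvRender) (fun t => pvRGet t "id") false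

-- ===== PORT A =====

-- A's child loop body: parent_map[child_id].append(...); terms.setdefault(child_id, {...})
def pvChildA (sid nm : String) (child_names : List String)
    (st : PySem.Dict String PvTerm × PySem.Dict String (List (String × String)))
    (p : ℤ × String) : PySem.Dict String PvTerm × PySem.Dict String (List (String × String)) :=
  let child_id := pvFirstField p.2
  if child_id = "" then st
  else
    let child_name := if p.1 < (child_names.length : ℤ)
      then (PySem.List.pyGet? child_names p.1).getD "" else ""
    let pm := st.2.insert child_id (st.2.getD child_id [] ++ [(sid, nm)])
    (st.1.setdefault child_id (pvMkTerm child_id child_name ""), pm)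

-- A's record loop body (threads terms and parent_map)
def pvStepA (st : PySem.Dict String PvTerm × PySem.Dict String (List (String × String)))
    (record : List (String × String)) :
    PySem.Dict String PvTerm × PySem.Dict String (List (String × String)) :=
  let stable_id := pvFirstField (pvRGet record "reactome_stable_id")
  if stable_id = "" then st
  else
    let nm := pvRGet record "display_name"
    let terms := st.1.setdefault stable_id (pvMkTerm stable_id nm (pvRGet record "definition"))
    let terms := terms.insert stable_id (pvIngest record (terms.getD stable_id (pvMkTerm "" "" "")))
    let child_ids := pvSplitField (pvRGet record "child_pathway_reactome_stable_id")
    let child_names := pvSplitField (pvRGet record "child_pathway_display_name")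
    (PySem.List.enumerate child_ids).foldl (pvChildA stable_id nm child_names) (terms, st.2)

-- A's second pass, inner loop over one parent_map item (seen-set dedup, append to terms[tid])
def pvApplyLoop (tid : String) (ps : List (String × String))
    (st : PySem.Dict String PvTerm × PySem.Set (String × String)) :
    PySem.Dict String PvTerm × PySem.Set (String × String) :=
  ps.foldl (fun st pr =>
    if st.2.contains pr then st
    else
      let t := st.1.getD tid (pvMkTerm "" "" "")   -- key always present: terms.setdefault ran for every parent_map key
      (st.1.insert tid { t with parentIds := t.parentIds ++ [pr.1],
                                parentNames := t.parentNames ++ [pr.2] },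
       PySem.Set.add st.2 pr)) st

def pvApplyParents (terms : PySem.Dict String PvTerm)
    (item : String × List (String × String)) : PySem.Dict String PvTerm :=
  (pvApplyLoop item.1 item.2 (terms, PySem.Set.empty)).1

def build_pathway_terms_py (pathway_records : List (List (String × String))) :
    List (List (String × String)) :=
  let st := pathway_records.foldl pvStepA (PySem.Dict.empty, PySem.Dict.empty)
  pvFinalize (st.2.items.foldl pvApplyParents st.1)

-- ===== PORT B =====

-- B's child loop body: setdefault the child, then append the (parent id, parent name) pair
-- directly unless it is already among the child's recorded pairs
def pvChildB (sid nm : String) (child_names : List String)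
    (terms : PySem.Dict String PvTerm) (p : ℤ × String) : PySem.Dict String PvTerm :=
  let child_id := pvFirstField p.2
  if child_id = "" then terms
  else
    let child_name := if p.1 < (child_names.length : ℤ)
      then (PySem.List.pyGet? child_names p.1).getD "" else ""
    let terms := terms.setdefault child_id (pvMkTerm child_id child_name "")
    let child := terms.getD child_id (pvMkTerm "" "" "")
    if (sid, nm) ∈ child.parentIds.zip child.parentNames then terms
    else terms.insert child_id { child with parentIds := child.parentIds ++ [sid],
                                            parentNames := child.parentNames ++ [nm] }

-- B's record loop body (terms only; no parent_map)
def pvStepB (terms : PySem.Dict String PvTerm) (record : List (String × String)) :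
    PySem.Dict String PvTerm :=
  let stable_id := pvFirstField (pvRGet record "reactome_stable_id")
  if stable_id = "" then terms
  else
    let nm := pvRGet record "display_name"
    let terms := terms.setdefault stable_id (pvMkTerm stable_id nm (pvRGet record "definition"))
    let terms := terms.insert stable_id (pvIngest record (terms.getD stable_id (pvMkTerm "" "" "")))
    let child_ids := pvSplitField (pvRGet record "child_pathway_reactome_stable_id")
    let child_names := pvSplitField (pvRGet record "child_pathway_display_name")
    (PySem.List.enumerate child_ids).foldl (pvChildB stable_id nm child_names) terms

def build_pathway_terms_py_alt (pathway_records : List (List (String × String))) :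
    List (List (String × String)) :=
  pvFinalize (pathway_records.foldl pvStepB PySem.Dict.empty)

-- ===== PRECONDITION & SPEC =====
def Spec_build_pathway_terms_py (pathway_records : List (List (String × String))) (out : List (List (String × String))) : Prop := out = build_pathway_terms_py_alt pathway_records
instance (pathway_records : List (List (String × String))) (out : List (List (String × String))) : Decidable (Spec_build_pathway_terms_py pathway_records out) := by unfold Spec_build_pathway_terms_py; infer_instance

-- ===== CLAIM (what is proved, stated in full; the proofs are below) =====
def Claim_equal_build_pathway_terms_py : Prop := ∀ (pathway_records : List (List (String × String))), Dom_build_pathway_terms_py pathway_records → Spec_build_pathway_terms_py pathway_records (build_pathway_terms_py pathway_records)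

-- ===== LEMMAS AND PROOFS =====

-- append parent pairs onto a term's parent fields
def pvAddP (t : PvTerm) (ps : List (String × String)) : PvTerm :=
  { t with parentIds := t.parentIds ++ ps.map Prod.fst,
           parentNames := t.parentNames ++ ps.map Prod.snd }

-- the pairs a seen-set dedup loop appends
def pvNew (seen : PySem.Set (String × String)) :
    List (String × String) → List (String × String)
  | [] => []
  | p :: ps => if seen.contains p then pvNew seen ps else p :: pvNew (PySem.Set.add seen p) ps

-- the coupling invariant between A's state (tA, pm) and B's state tB during the record loop
def pvInv (tA : PySem.Dict String PvTerm) (pm : PySem.Dict String (List (String × String)))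
    (tB : PySem.Dict String PvTerm) : Prop :=
  tA.keys.Nodup ∧ pm.keys.Nodup ∧
  (∀ p ∈ tA.items, p.2.parentIds = [] ∧ p.2.parentNames = []) ∧
  (∀ k, pm.contains k = true → tA.contains k = true) ∧
  tB.items = tA.items.map (fun p => (p.1, pvAddP p.2 (PySem.Set.ofList (pm.getD p.1 []))))

theorem pvAddP_nil (t : PvTerm) : pvAddP t [] = t := by cases t; simp [pvAddP]

theorem pvAddP_append (t : PvTerm) (l m : List (String × String)) :
    pvAddP (pvAddP t l) m = pvAddP t (l ++ m) := by cases t; simp [pvAddP]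

theorem pvUpdate_eq_append_new (ps : List (String × String)) (seen : PySem.Set (String × String)) :
    PySem.Set.update seen ps = seen ++ pvNew seen ps := by
  induction ps generalizing seen with
  | nil => simp [PySem.Set.update, pvNew]
  | cons p ps ih =>
    by_cases h : seen.contains p = true
    · have hmem : p ∈ seen := by simpa [PySem.Set.contains] using h
      have ha : PySem.Set.add seen p = seen := by simp [PySem.Set.add, hmem]
      have hu : PySem.Set.update seen (p :: ps) = PySem.Set.update (PySem.Set.add seen p) ps := rfl
      rw [hu, ha, ih, pvNew, h]; simp
    · have hmem : p ∉ seen := by simpa [PySem.Set.contains] using h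
      have ha : PySem.Set.add seen p = seen ++ [p] := by simp [PySem.Set.add, hmem]
      have hu : PySem.Set.update seen (p :: ps) = PySem.Set.update (PySem.Set.add seen p) ps := rfl
      rw [hu, ha, ih, pvNew]
      simp [hmem]

theorem pvOfList_eq_new (ps : List (String × String)) :
    PySem.Set.ofList ps = pvNew PySem.Set.empty ps := by
  have h : PySem.Set.ofList ps = PySem.Set.update PySem.Set.empty ps := rfl
  rw [h, pvUpdate_eq_append_new]; rfl
theorem pvApplyLoop_items (tid : String) (ps : List (String × String))
    (seen : PySem.Set (String × String)) (tms : PySem.Dict String PvTerm)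
    (h : tms.contains tid = true) (hk : tms.keys.Nodup) :
    (pvApplyLoop tid ps (tms, seen)).1.items
      = tms.items.map (fun p => if p.1 == tid then (tid, pvAddP p.2 (pvNew seen ps)) else p) := by
  induction ps generalizing seen tms with
  | nil =>
    have hmap : ∀ p ∈ tms.items, (if p.1 == tid then (tid, pvAddP p.2 (pvNew seen [])) else p) = p := by
      intro p hp
      obtain ⟨a, b⟩ := p
      by_cases h1 : a = tid
      · simp [h1, pvNew, pvAddP_nil]
      · simp [h1]
    rw [List.map_congr_left hmap]
    simp [pvApplyLoop]
  | cons pr ps ih =>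
    by_cases hc : pr ∈ seen
    · have hcb : seen.contains pr = true := by simpa [PySem.Set.contains] using hc
      have hstep : pvApplyLoop tid (pr :: ps) (tms, seen) = pvApplyLoop tid ps (tms, seen) := by
        simp [pvApplyLoop, hc]
      rw [hstep, ih _ _ h hk]
      simp only [pvNew, hcb, if_true]
    · have hcb : seen.contains pr = false := by
        simpa [PySem.Set.contains] using hc
      have hstep : pvApplyLoop tid (pr :: ps) (tms, seen)
          = pvApplyLoop tid ps
              (tms.insert tid (pvAddP (tms.getD tid (pvMkTerm "" "" "")) [pr]), seen.add pr) := by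
        simp [pvApplyLoop, hc, pvAddP]
      have hc' : (tms.insert tid (pvAddP (tms.getD tid (pvMkTerm "" "" "")) [pr])).contains tid = true := by
        simp
      have hk' := PySem.Dict.nodup_keys_insert tms tid (pvAddP (tms.getD tid (pvMkTerm "" "" "")) [pr]) hk
      rw [hstep, ih _ _ hc' hk', PySem.Dict.items_insert_of_contains _ _ h, List.map_map]
      apply List.map_congr_left
      intro p hp
      by_cases h1 : p.1 = tid
      · have hpe : (tid, p.2) ∈ tms.items := by rw [← h1]; exact hp
        have hg : tms.getD tid (pvMkTerm "" "" "") = p.2 :=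
          PySem.Dict.getD_of_mem_items tms hpe hk _
        simp [Function.comp, h1, hg, pvAddP_append, pvNew, hc]
      · simp [Function.comp, h1]
theorem pvApplyParents_items (tid : String) (ps : List (String × String))
    (tms : PySem.Dict String PvTerm) (h : tms.contains tid = true) (hk : tms.keys.Nodup) :
    (pvApplyParents tms (tid, ps)).items
      = tms.items.map (fun p => if p.1 == tid then (tid, pvAddP p.2 (PySem.Set.ofList ps)) else p) := by
  have he : pvApplyParents tms (tid, ps) = (pvApplyLoop tid ps (tms, PySem.Set.empty)).1 := rfl
  rw [he, pvApplyLoop_items tid ps PySem.Set.empty tms h hk, pvOfList_eq_new]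

theorem pvApplyParents_keys (tid : String) (ps : List (String × String))
    (tms : PySem.Dict String PvTerm) (h : tms.contains tid = true) (hk : tms.keys.Nodup) :
    (pvApplyParents tms (tid, ps)).keys = tms.keys := by
  have hi := pvApplyParents_items tid ps tms h hk
  simp only [PySem.Dict.keys] at *
  rw [hi, List.map_map]
  apply List.map_congr_left
  intro p hp
  by_cases h1 : p.1 = tid <;> simp [Function.comp, h1]
theorem pvPhase2_items (L : List (String × List (String × String)))
    (tms : PySem.Dict String PvTerm) (hnd : (L.map Prod.fst).Nodup)
    (hsub : ∀ q ∈ L, tms.contains q.1 = true) (hk : tms.keys.Nodup) :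
    (L.foldl pvApplyParents tms).items
      = tms.items.map (fun p => (p.1, pvAddP p.2 (PySem.Set.ofList ((PySem.Dict.mk L).getD p.1 [])))) := by
  induction L generalizing tms with
  | nil =>
    have hmap : ∀ p ∈ tms.items,
        ((p.1, pvAddP p.2 (PySem.Set.ofList ((PySem.Dict.mk ([] : List (String × List (String × String)))).getD p.1 [])))
          : String × PvTerm) = p := by
      intro p hp
      have hg : (PySem.Dict.mk ([] : List (String × List (String × String)))).getD p.1 [] = [] := rfl
      rw [hg]
      have : PySem.Set.ofList ([] : List (String × String)) = [] := rfl
      rw [this, pvAddP_nil]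
    rw [List.foldl_nil, List.map_congr_left hmap]
    simp
  | cons q rest ih =>
    obtain ⟨tid, ps⟩ := q
    have h1 : tms.contains tid = true := hsub _ (List.mem_cons_self)
    have hnotin : tid ∉ rest.map Prod.fst := by
      simp only [List.map_cons, List.nodup_cons] at hnd; exact hnd.1
    have hkeys := pvApplyParents_keys tid ps tms h1 hk
    have hk' : (pvApplyParents tms (tid, ps)).keys.Nodup := by rw [hkeys]; exact hk
    have hsub' : ∀ q' ∈ rest, (pvApplyParents tms (tid, ps)).contains q'.1 = true := by
      intro q' hq'
      rw [PySem.Dict.contains_eq_decide_mem_keys, hkeys, ← PySem.Dict.contains_eq_decide_mem_keys]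
      exact hsub _ (List.mem_cons_of_mem _ hq')
    have hnd' : (rest.map Prod.fst).Nodup := by
      simp only [List.map_cons, List.nodup_cons] at hnd; exact hnd.2
    rw [List.foldl_cons, ih _ hnd' hsub' hk',
        pvApplyParents_items tid ps tms h1 hk, List.map_map]
    apply List.map_congr_left
    intro p hp
    have hrest : (PySem.Dict.mk rest).getD tid [] = [] := by
      have hf : rest.find? (fun x => x.1 == tid) = none := by
        rw [List.find?_eq_none]
        intro x hx
        simp only [beq_iff_eq]
        intro hxe
        exact hnotin (hxe ▸ List.mem_map_of_mem hx)
      simp [PySem.Dict.getD, PySem.Dict.get?, hf]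
    by_cases h2 : p.1 = tid
    · have hcons : (PySem.Dict.mk ((tid, ps) :: rest)).getD tid [] = ps := by
        simp [PySem.Dict.getD, PySem.Dict.get?_mk_cons]
      simp [Function.comp, h2, hrest, hcons, pvAddP_append]
    · have hcons : (PySem.Dict.mk ((tid, ps) :: rest)).getD p.1 []
          = (PySem.Dict.mk rest).getD p.1 [] := by
        have := PySem.Dict.get?_mk_cons tid ps rest p.1
        have hne : (tid == p.1) = false := by simp [Ne.symm h2]
        simp [PySem.Dict.getD, this, hne]
      simp [Function.comp, h2, hcons]
theorem pvOfList_snoc (l : List (String × String)) (x : String × String) :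
    PySem.Set.ofList (l ++ [x])
      = if x ∈ l then PySem.Set.ofList l else PySem.Set.ofList l ++ [x] := by
  have h : PySem.Set.ofList (l ++ [x]) = PySem.Set.add (PySem.Set.ofList l) x := by
    simp [PySem.Set.ofList, List.foldl_append, PySem.Set.add]
  rw [h]
  by_cases hm : x ∈ l
  · have hx : x ∈ PySem.Set.ofList l := (PySem.Set.mem_ofList l x).mpr hm
    simp [PySem.Set.add, PySem.Set.contains, hx, hm]
  · have hx : x ∉ PySem.Set.ofList l := fun hx => hm ((PySem.Set.mem_ofList l x).mp hx)
    simp [PySem.Set.add, PySem.Set.contains, hx, hm]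

theorem pvIngest_addP (r : List (String × String)) (t : PvTerm) (l : List (String × String)) :
    pvIngest r (pvAddP t l) = pvAddP (pvIngest r t) l := by
  cases t; simp only [pvIngest, pvAddP]; split_ifs <;> rfl

theorem pvIngest_parents (r : List (String × String)) (t : PvTerm) :
    (pvIngest r t).parentIds = t.parentIds ∧ (pvIngest r t).parentNames = t.parentNames := by
  cases t; simp only [pvIngest]; split_ifs <;> simp

theorem pvInv_keys (tA : PySem.Dict String PvTerm) (pm : PySem.Dict String (List (String × String)))
    (tB : PySem.Dict String PvTerm) (h : pvInv tA pm tB) : tB.keys = tA.keys := by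
  obtain ⟨-, -, -, -, hitems⟩ := h
  simp only [PySem.Dict.keys, hitems, List.map_map]
  apply List.map_congr_left; intro p hp; rfl

theorem pvInv_contains (tA : PySem.Dict String PvTerm) (pm : PySem.Dict String (List (String × String)))
    (tB : PySem.Dict String PvTerm) (h : pvInv tA pm tB) (k : String) :
    tB.contains k = tA.contains k := by
  rw [PySem.Dict.contains_eq_decide_mem_keys, PySem.Dict.contains_eq_decide_mem_keys,
      pvInv_keys tA pm tB h]

theorem pvInv_nodupB (tA : PySem.Dict String PvTerm) (pm : PySem.Dict String (List (String × String)))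
    (tB : PySem.Dict String PvTerm) (h : pvInv tA pm tB) : tB.keys.Nodup := by
  rw [pvInv_keys tA pm tB h]; exact h.1

theorem pvInv_getD (tA : PySem.Dict String PvTerm) (pm : PySem.Dict String (List (String × String)))
    (tB : PySem.Dict String PvTerm) (h : pvInv tA pm tB) (k : String) (d0 : PvTerm)
    (hc : tA.contains k = true) :
    tB.getD k d0 = pvAddP (tA.getD k d0) (PySem.Set.ofList (pm.getD k [])) := by
  have hsome : (tA.get? k).isSome := by rw [← PySem.Dict.contains_eq_isSome_get?]; exact hc
  obtain ⟨v, hv⟩ := Option.isSome_iff_exists.mp hsome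
  have hmemA : (k, v) ∈ tA.items := PySem.Dict.mem_items_of_get?_eq_some tA hv
  have hmemB : (k, pvAddP v (PySem.Set.ofList (pm.getD k []))) ∈ tB.items := by
    rw [h.2.2.2.2]
    exact List.mem_map_of_mem hmemA
  rw [PySem.Dict.getD_of_mem_items tB hmemB (pvInv_nodupB tA pm tB h) d0,
      PySem.Dict.getD_of_mem_items tA hmemA h.1 d0]

theorem pvAddP_one (t : PvTerm) (a b : String) :
    { t with parentIds := t.parentIds ++ [a], parentNames := t.parentNames ++ [b] }
      = pvAddP t [(a, b)] := by
  cases t; simp [pvAddP]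

theorem pvChildStep_inv (sid nm : String) (child_names : List String) (p : ℤ × String)
    (tA : PySem.Dict String PvTerm) (pm : PySem.Dict String (List (String × String)))
    (tB : PySem.Dict String PvTerm) (h : pvInv tA pm tB) :
    pvInv (pvChildA sid nm child_names (tA, pm) p).1 (pvChildA sid nm child_names (tA, pm) p).2
          (pvChildB sid nm child_names tB p) := by
  obtain ⟨hkA, hkpm, hpar, hsub, hitems⟩ := h
  have h : pvInv tA pm tB := ⟨hkA, hkpm, hpar, hsub, hitems⟩
  by_cases hcid : pvFirstField p.2 = ""
  · simpa [pvChildA, pvChildB, hcid] using h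
  · simp only [pvChildA, pvChildB, if_neg hcid]
    set cid := pvFirstField p.2 with hcidE
    set cnm := (if p.1 < (child_names.length : ℤ) then (PySem.List.pyGet? child_names p.1).getD "" else "") with hcnmE
    by_cases hA : tA.contains cid = true
    · -- the child term already exists: A only records the pair in pm; B appends it unless seen
      have hBc : tB.contains cid = true := by rw [pvInv_contains tA pm tB h]; exact hA
      rw [PySem.Dict.setdefault_of_contains _ _ hA, PySem.Dict.setdefault_of_contains _ _ hBc]
      have hsome : (tA.get? cid).isSome := by rw [← PySem.Dict.contains_eq_isSome_get?]; exact hA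
      obtain ⟨v, hv⟩ := Option.isSome_iff_exists.mp hsome
      have hmemA : (cid, v) ∈ tA.items := PySem.Dict.mem_items_of_get?_eq_some tA hv
      have hgA : tA.getD cid (pvMkTerm "" "" "") = v := PySem.Dict.getD_of_mem_items tA hmemA hkA _
      obtain ⟨hv1, hv2⟩ := hpar (cid, v) hmemA
      dsimp only at hv1 hv2
      have hgB : tB.getD cid (pvMkTerm "" "" "")
          = pvAddP v (PySem.Set.ofList (pm.getD cid [])) := by
        rw [pvInv_getD tA pm tB h cid (pvMkTerm "" "" "") hA, hgA]
      rw [hgB]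
      have hzip : (pvAddP v (PySem.Set.ofList (pm.getD cid []))).parentIds.zip
            (pvAddP v (PySem.Set.ofList (pm.getD cid []))).parentNames
          = PySem.Set.ofList (pm.getD cid []) := by
        simp [pvAddP, hv1, hv2, List.zip_map']
      rw [hzip]
      by_cases hmem : (sid, nm) ∈ pm.getD cid []
      · have hms : (sid, nm) ∈ PySem.Set.ofList (pm.getD cid []) :=
          (PySem.Set.mem_ofList _ _).mpr hmem
        rw [if_pos hms]
        refine ⟨hkA, PySem.Dict.nodup_keys_insert _ _ _ hkpm, hpar, ?_, ?_⟩
        · intro k hk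
          rw [PySem.Dict.contains_insert] at hk
          rcases Bool.or_eq_true_iff.mp hk with h1 | h1
          · rw [eq_of_beq h1]; exact hA
          · exact hsub k h1
        · rw [hitems]
          apply List.map_congr_left
          intro q hq
          by_cases hq1 : q.1 = cid
          · have hgg : (pm.insert cid (pm.getD cid [] ++ [(sid, nm)])).getD cid []
                = pm.getD cid [] ++ [(sid, nm)] := by
              rw [PySem.Dict.getD_insert]; simp
            rw [hq1, hgg, pvOfList_snoc, if_pos hmem]
          · rw [PySem.Dict.getD_insert, if_neg hq1]
      · have hms : (sid, nm) ∉ PySem.Set.ofList (pm.getD cid []) := fun hx =>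
          hmem ((PySem.Set.mem_ofList _ _).mp hx)
        rw [if_neg hms, pvAddP_one, pvAddP_append]
        refine ⟨hkA, PySem.Dict.nodup_keys_insert _ _ _ hkpm, hpar, ?_, ?_⟩
        · intro k hk
          rw [PySem.Dict.contains_insert] at hk
          rcases Bool.or_eq_true_iff.mp hk with h1 | h1
          · rw [eq_of_beq h1]; exact hA
          · exact hsub k h1
        · rw [PySem.Dict.items_insert_of_contains _ _ hBc, hitems, List.map_map]
          apply List.map_congr_left
          intro q hq
          by_cases hq1 : q.1 = cid
          · have hq2 : q.2 = v := by
              have : (cid, q.2) ∈ tA.items := by rw [← hq1]; exact hq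
              have := PySem.Dict.getD_of_mem_items tA this hkA (pvMkTerm "" "" "")
              rw [hgA] at this; exact this.symm
            have hgg : (pm.insert cid (pm.getD cid [] ++ [(sid, nm)])).getD cid []
                = pm.getD cid [] ++ [(sid, nm)] := by
              rw [PySem.Dict.getD_insert]; simp
            simp only [Function.comp, hq1, beq_self_eq_true, if_true, hgg]
            rw [hq2, pvOfList_snoc, if_neg hmem]
          · have hq1b : (q.1 == cid) = false := by simp [hq1]
            simp only [Function.comp, hq1b, Bool.false_eq_true, if_false,
              PySem.Dict.getD_insert, if_neg hq1]
    · -- fresh child id: both create the child term; its first parent pair is recorded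
      have hAf : tA.contains cid = false := by simpa using hA
      have hBf : tB.contains cid = false := by rw [pvInv_contains tA pm tB h]; exact hAf
      have hpmf : pm.contains cid = false := by
        by_contra hx
        exact hA (hsub cid (by simpa using hx))
      have hnomem : ∀ q ∈ tA.items, q.1 ≠ cid := by
        intro q hq he
        have : tA.contains cid = decide (cid ∈ tA.keys) := PySem.Dict.contains_eq_decide_mem_keys tA cid
        rw [hAf] at this
        have hmemk : cid ∈ tA.keys := by
          simp only [PySem.Dict.keys]
          exact he ▸ List.mem_map_of_mem hq
        simp [hmemk] at this
      rw [PySem.Dict.setdefault_of_not_contains _ _ hAf, PySem.Dict.setdefault_of_not_contains _ _ hBf]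
      have hpm0 : pm.getD cid [] = [] := PySem.Dict.getD_of_not_contains pm [] hpmf
      have hgB1 : (tB.insert cid (pvMkTerm cid cnm "")).getD cid (pvMkTerm "" "" "")
          = pvMkTerm cid cnm "" := by rw [PySem.Dict.getD_insert]; simp
      rw [hgB1]
      have hzip0 : (pvMkTerm cid cnm "").parentIds.zip (pvMkTerm cid cnm "").parentNames
          = ([] : List (String × String)) := rfl
      rw [hzip0, if_neg (List.not_mem_nil (a := (sid, nm))), pvAddP_one, PySem.Dict.insert_insert_self]
      refine ⟨PySem.Dict.nodup_keys_insert _ _ _ hkA, PySem.Dict.nodup_keys_insert _ _ _ hkpm,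
        ?_, ?_, ?_⟩
      · intro q hq
        rw [PySem.Dict.items_insert_of_not_contains _ _ hAf] at hq
        rcases List.mem_append.mp hq with h1 | h1
        · exact hpar q h1
        · have : q = (cid, pvMkTerm cid cnm "") := by simpa using h1
          rw [this]; exact ⟨rfl, rfl⟩
      · intro k hk
        rw [PySem.Dict.contains_insert] at hk ⊢
        rcases Bool.or_eq_true_iff.mp hk with h1 | h1
        · rw [h1]; simp
        · rw [hsub k h1]; simp
      · rw [PySem.Dict.items_insert_of_not_contains _ _ hBf,
            PySem.Dict.items_insert_of_not_contains _ _ hAf, List.map_append, hitems]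
        congr 1
        · apply List.map_congr_left
          intro q hq
          have hq1 : q.1 ≠ cid := hnomem q hq
          rw [PySem.Dict.getD_insert, if_neg hq1]
        · simp only [List.map_cons, List.map_nil, hpm0, List.nil_append]
          have hgg2 : (pm.insert cid [(sid, nm)]).getD cid [] = [(sid, nm)] := by
            rw [PySem.Dict.getD_insert]; simp
          have hof : PySem.Set.ofList [(sid, nm)] = [(sid, nm)] := by
            simp [PySem.Set.ofList, PySem.Set.add, PySem.Set.contains, PySem.Set.empty]
          rw [hgg2, hof]

theorem pvChild_inv (sid nm : String) (child_names : List String)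
    (l : List (ℤ × String)) (tA : PySem.Dict String PvTerm)
    (pm : PySem.Dict String (List (String × String))) (tB : PySem.Dict String PvTerm)
    (h : pvInv tA pm tB) :
    pvInv (l.foldl (pvChildA sid nm child_names) (tA, pm)).1
          (l.foldl (pvChildA sid nm child_names) (tA, pm)).2
          (l.foldl (pvChildB sid nm child_names) tB) := by
  induction l generalizing tA pm tB with
  | nil => exact h
  | cons x xs ih =>
    simp only [List.foldl_cons]
    exact ih _ _ _ (pvChildStep_inv sid nm child_names x tA pm tB h)
theorem pvStep_inv (r : List (String × String)) (tA : PySem.Dict String PvTerm)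
    (pm : PySem.Dict String (List (String × String))) (tB : PySem.Dict String PvTerm)
    (h : pvInv tA pm tB) :
    pvInv (pvStepA (tA, pm) r).1 (pvStepA (tA, pm) r).2 (pvStepB tB r) := by
  obtain ⟨hkA, hkpm, hpar, hsub, hitems⟩ := h
  have h : pvInv tA pm tB := ⟨hkA, hkpm, hpar, hsub, hitems⟩
  by_cases hsid : pvFirstField (pvRGet r "reactome_stable_id") = ""
  · simpa [pvStepA, pvStepB, hsid] using h
  · simp only [pvStepA, pvStepB, if_neg hsid]
    set sid := pvFirstField (pvRGet r "reactome_stable_id") with hsidE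
    set nm := pvRGet r "display_name" with hnmE
    set mk0 := pvMkTerm sid nm (pvRGet r "definition") with hmk0E
    apply pvChild_inv
    by_cases hA : tA.contains sid = true
    · -- existing term: setdefault is a no-op, both sides re-insert the ingested term
      have hBc : tB.contains sid = true := by rw [pvInv_contains tA pm tB h]; exact hA
      rw [PySem.Dict.setdefault_of_contains _ _ hA, PySem.Dict.setdefault_of_contains _ _ hBc]
      have hsome : (tA.get? sid).isSome := by rw [← PySem.Dict.contains_eq_isSome_get?]; exact hA
      obtain ⟨v, hv⟩ := Option.isSome_iff_exists.mp hsome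
      have hmemA : (sid, v) ∈ tA.items := PySem.Dict.mem_items_of_get?_eq_some tA hv
      have hgA : tA.getD sid (pvMkTerm "" "" "") = v := PySem.Dict.getD_of_mem_items tA hmemA hkA _
      obtain ⟨hv1, hv2⟩ := hpar (sid, v) hmemA
      dsimp only at hv1 hv2
      have hgB : tB.getD sid (pvMkTerm "" "" "")
          = pvAddP v (PySem.Set.ofList (pm.getD sid [])) := by
        rw [pvInv_getD tA pm tB h sid (pvMkTerm "" "" "") hA, hgA]
      rw [hgA, hgB, pvIngest_addP]
      refine ⟨PySem.Dict.nodup_keys_insert _ _ _ hkA, hkpm, ?_, ?_, ?_⟩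
      · intro q hq
        rw [PySem.Dict.items_insert_of_contains _ _ hA] at hq
        obtain ⟨q', hq', hq'e⟩ := List.mem_map.mp hq
        by_cases hq1 : (q'.1 == sid) = true
        · rw [if_pos hq1] at hq'e
          rw [← hq'e]
          have := pvIngest_parents r v
          exact ⟨by simp [this.1, hv1], by simp [this.2, hv2]⟩
        · rw [if_neg (by simp at hq1 ⊢; exact hq1)] at hq'e
          rw [← hq'e]; exact hpar q' hq'
      · intro k hk
        rw [PySem.Dict.contains_insert]
        rw [hsub k hk]; simp
      · rw [PySem.Dict.items_insert_of_contains _ _ hBc,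
            PySem.Dict.items_insert_of_contains _ _ hA, hitems, List.map_map, List.map_map]
        apply List.map_congr_left
        intro q hq
        by_cases hq1 : q.1 = sid
        · have hq2 : q.2 = v := by
            have hmm : (sid, q.2) ∈ tA.items := by rw [← hq1]; exact hq
            have := PySem.Dict.getD_of_mem_items tA hmm hkA (pvMkTerm "" "" "")
            rw [hgA] at this; exact this.symm
          simp only [Function.comp, hq1, beq_self_eq_true, if_true, hq2]
        · have hq1b : (q.1 == sid) = false := by simp [hq1]
          simp only [Function.comp, hq1b, Bool.false_eq_true, if_false]
    · -- fresh term: both append the template, then both overwrite it with the ingested value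
      have hAf : tA.contains sid = false := by simpa using hA
      have hBf : tB.contains sid = false := by rw [pvInv_contains tA pm tB h]; exact hAf
      have hpmf : pm.contains sid = false := by
        by_contra hx
        exact hA (hsub sid (by simpa using hx))
      have hpm0 : pm.getD sid [] = [] := PySem.Dict.getD_of_not_contains pm [] hpmf
      have hnomem : ∀ q ∈ tA.items, q.1 ≠ sid := by
        intro q hq he
        have hc : tA.contains sid = decide (sid ∈ tA.keys) := PySem.Dict.contains_eq_decide_mem_keys tA sid
        rw [hAf] at hc
        have hmemk : sid ∈ tA.keys := by
          simp only [PySem.Dict.keys]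
          exact he ▸ List.mem_map_of_mem hq
        simp [hmemk] at hc
      rw [PySem.Dict.setdefault_of_not_contains _ _ hAf, PySem.Dict.setdefault_of_not_contains _ _ hBf]
      have hgA1 : (tA.insert sid mk0).getD sid (pvMkTerm "" "" "") = mk0 := by
        rw [PySem.Dict.getD_insert]; simp
      have hgB1 : (tB.insert sid mk0).getD sid (pvMkTerm "" "" "") = mk0 := by
        rw [PySem.Dict.getD_insert]; simp
      rw [hgA1, hgB1, PySem.Dict.insert_insert_self, PySem.Dict.insert_insert_self]
      refine ⟨PySem.Dict.nodup_keys_insert _ _ _ hkA, hkpm, ?_, ?_, ?_⟩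
      · intro q hq
        rw [PySem.Dict.items_insert_of_not_contains _ _ hAf] at hq
        rcases List.mem_append.mp hq with h1 | h1
        · exact hpar q h1
        · have hqe : q = (sid, pvIngest r mk0) := by simpa using h1
          have := pvIngest_parents r mk0
          rw [hqe]
          exact ⟨this.1.trans rfl, this.2.trans rfl⟩
      · intro k hk
        rw [PySem.Dict.contains_insert, hsub k hk]; simp
      · rw [PySem.Dict.items_insert_of_not_contains _ _ hBf,
            PySem.Dict.items_insert_of_not_contains _ _ hAf, List.map_append, hitems]
        congr 1
        simp only [List.map_cons, List.map_nil, hpm0]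
        rw [show PySem.Set.ofList ([] : List (String × String)) = [] from rfl, pvAddP_nil]
theorem pvFold_inv (rs : List (List (String × String))) :
    pvInv (rs.foldl pvStepA (PySem.Dict.empty, PySem.Dict.empty)).1
          (rs.foldl pvStepA (PySem.Dict.empty, PySem.Dict.empty)).2
          (rs.foldl pvStepB PySem.Dict.empty) := by
  have hgen : ∀ (l : List (List (String × String))) tA pm tB, pvInv tA pm tB →
      pvInv (l.foldl pvStepA (tA, pm)).1 (l.foldl pvStepA (tA, pm)).2 (l.foldl pvStepB tB) := by
    intro l
    induction l with
    | nil => intro tA pm tB h; exact h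
    | cons x xs ih =>
      intro tA pm tB h
      simp only [List.foldl_cons]
      exact ih _ _ _ (pvStep_inv x tA pm tB h)
  apply hgen
  refine ⟨by simp [PySem.Dict.empty, PySem.Dict.keys], by simp [PySem.Dict.empty, PySem.Dict.keys],
    ?_, ?_, ?_⟩
  · intro q hq; simp [PySem.Dict.empty] at hq
  · intro k hk; simp [PySem.Dict.empty, PySem.Dict.contains] at hk
  · rfl

-- ===== VERDICT (by name: the statement is the Claim_ definition above) =====
theorem build_pathway_terms_py_spec : Claim_equal_build_pathway_terms_py := by
  intro rs _
  show build_pathway_terms_py rs = build_pathway_terms_py_alt rs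
  obtain ⟨hkA, hkpm, hpar, hsub, hitems⟩ := pvFold_inv rs
  set stA := rs.foldl pvStepA (PySem.Dict.empty, PySem.Dict.empty) with hstA
  have hnd : (stA.2.items.map Prod.fst).Nodup := by
    have : stA.2.keys = stA.2.items.map Prod.fst := by
      simp [PySem.Dict.keys]
    rw [← this]; exact hkpm
  have hsub' : ∀ q ∈ stA.2.items, stA.1.contains q.1 = true := by
    intro q hq
    apply hsub
    rw [PySem.Dict.contains_eq_decide_mem_keys]
    simp only [PySem.Dict.keys]
    simp only [decide_eq_true_eq]
    exact List.mem_map_of_mem hq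
  have hphase := pvPhase2_items stA.2.items stA.1 hnd hsub' hkA
  have hmk : PySem.Dict.mk stA.2.items = stA.2 := rfl
  rw [hmk] at hphase
  have hdicts : stA.2.items.foldl pvApplyParents stA.1 = rs.foldl pvStepB PySem.Dict.empty := by
    apply PySem.Dict.ext
    rw [hphase, hitems]
  show pvFinalize (stA.2.items.foldl pvApplyParents stA.1) = _
  rw [hdicts]
  rfl
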